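-- pv_equiv track=rewrite | github.com/RicKinG3/python_labs_1_sem | labs/lab_8/p.py | max_min_element_sum_column_swap
-- ===== SOURCE A (Python) =====
-- def max_min_element_sum_column_swap(arr):
--     columns = dict.fromkeys(range(len(arr[0])), 0)
--     for i in arr:
--         for j, v in enumerate(i):
--             columns[j] += v
--     max_column = max(columns, key=columns.get)
--     min_column = min(columns, key=columns.get)
--     for i in arr:
--         i[max_column], i[min_column] = i[min_column], i[max_column]
--     return arr
-- ===== SOURCE B (Python) =====
-- def max_min_element_sum_column_swap(arr):
--     best = None
--     for j in range(len(arr[0])):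
--         s = 0
--         for row in arr:
--             s += row[j]
--         if best is None:
--             best = (s, j, s, j)
--         else:
--             mx, mxj, mn, mnj = best
--             if s > mx:
--                 mx, mxj = s, j
--             if s < mn:
--                 mn, mnj = s, j
--             best = (mx, mxj, mn, mnj)
--     _, mxj, _, mnj = best
--     perm = list(range(len(arr[0])))
--     perm[mxj], perm[mnj] = mnj, mxj
--     return [[row[perm[j]] for j in range(len(row))] for row in arr]
-- ===== Notes on version B (the rewrite author's own statement) =====
-- stated objective: alternative
-- what changed: B walks the matrix column-major once, keeping a running (max-sum, argmax, min-sum, argmin) accumulator instead of A's dict of per-column sums searched afterwards with max/min(key=...), and realises the swap as a column-permutation gather building new rows instead of A's in-place two-element swap per row.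
-- outside the precondition, e.g. on max_min_element_sum_column_swap([[1, 9, 1], [0, 9]]): A returns [[9, 1, 1], [9, 0]], B raises IndexError
import Mathlib
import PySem

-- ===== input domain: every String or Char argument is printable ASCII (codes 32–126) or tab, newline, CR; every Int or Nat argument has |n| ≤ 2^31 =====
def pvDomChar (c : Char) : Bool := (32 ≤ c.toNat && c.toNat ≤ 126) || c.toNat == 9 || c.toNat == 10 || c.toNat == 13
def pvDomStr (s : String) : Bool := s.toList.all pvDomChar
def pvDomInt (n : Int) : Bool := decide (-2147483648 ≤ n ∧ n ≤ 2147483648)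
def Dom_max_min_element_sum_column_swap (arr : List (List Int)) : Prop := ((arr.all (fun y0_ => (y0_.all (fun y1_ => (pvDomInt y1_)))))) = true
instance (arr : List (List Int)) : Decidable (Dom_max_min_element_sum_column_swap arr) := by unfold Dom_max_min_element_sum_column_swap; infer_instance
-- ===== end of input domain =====

-- B walks the matrix column-major once with a running (max,argmax,min,argmin) accumulator
-- and rebuilds the rows through a column permutation, instead of A's dict of column sums
-- searched with max/min(key=...) and in-place per-row swap (objective: alternative; A
-- mutates its argument in place while B builds new rows — equivalence is about the
-- returned value).


-- ===== PORT A =====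
-- i[max_column], i[min_column] = i[min_column], i[max_column] : both reads happen
-- before either write.  pyGetD / .toNat stand in for Python's indexing, exact whenever
-- the two indices are in range (guaranteed under Pre_; out of range Python raises).
def pvSwapRow (maxc minc : Int) (row : List Int) : List Int :=
  (row.set maxc.toNat (PySem.List.pyGetD row minc 0)).set minc.toNat
    (PySem.List.pyGetD row maxc 0)

def max_min_element_sum_column_swap (arr : List (List Int)) : List (List Int) :=
  -- arr[0] (IndexError on [] is excluded by Pre_)
  let row0 := (PySem.List.pyGet? arr 0).getD []
  -- columns = dict.fromkeys(range(len(arr[0])), 0)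
  let init : PySem.Dict Int Int :=
    (PySem.List.pyRange 0 (row0.length : Int)).foldl (fun d k => d.insert k 0) PySem.Dict.empty
  -- for i in arr: for j, v in enumerate(i): columns[j] += v
  -- (modify is exact when j is already a key, guaranteed under Pre_; Python raises KeyError otherwise)
  let columns := arr.foldl
    (fun d i => (PySem.List.enumerate i 0).foldl (fun d p => d.modify p.1 0 (· + p.2)) d) init
  -- max(columns, key=columns.get) / min(...): first extremal key in key order
  -- (every key is present, so columns.get j = columns.getD j 0)
  let max_column := (PySem.List.max? columns.keys (fun k => columns.getD k 0)).getD 0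
  let min_column := (PySem.List.min? columns.keys (fun k => columns.getD k 0)).getD 0
  arr.map (pvSwapRow max_column min_column)

-- ===== PORT B =====
-- s = 0; for row in arr: s += row[j]  — getD is exact while j is in range (under Pre_).
def pvColSum (arr : List (List Int)) (j : Nat) : Int :=
  arr.foldl (fun s row => s + row.getD j 0) 0

-- loop body over j in range(len(arr[0])): accumulator None | (mx, mxj, mn, mnj)
def pvScanStep (arr : List (List Int)) (acc : Option (Int × Nat × Int × Nat)) (j : Nat) :
    Option (Int × Nat × Int × Nat) :=
  let s := pvColSum arr j
  match acc with
  | none => some (s, j, s, j)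
  | some (mx, mxj, mn, mnj) =>
    let p1 := if mx < s then (s, j) else (mx, mxj)
    let p2 := if s < mn then (s, j) else (mn, mnj)
    some (p1.1, p1.2, p2.1, p2.2)

-- perm = list(range(m)); perm[mxj], perm[mnj] = mnj, mxj
def pvPerm (m mxj mnj : Nat) : List Nat := ((List.range m).set mxj mnj).set mnj mxj

def max_min_element_sum_column_swap_alt (arr : List (List Int)) : List (List Int) :=
  let m := ((PySem.List.pyGet? arr 0).getD []).length
  match (List.range m).foldl (pvScanStep arr) none with
  | none => []   -- here Python raises (m = 0; excluded by Pre_)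
  | some (_, mxj, _, mnj) =>
    let perm := pvPerm m mxj mnj
    -- [[row[perm[j]] for j in range(len(row))] for row in arr] (indices in range under Pre_)
    arr.map (fun row => (List.range row.length).map (fun j => row.getD (perm.getD j j) 0))

-- ===== PRECONDITION & SPEC =====
-- Pre_ admits the nonempty rectangular matrices with at least one column — the
-- function's natural domain.  Outside it A raises (IndexError on [], ValueError on an
-- empty first row, KeyError when a row is longer than the first, IndexError when the
-- extremal column index falls beyond a short row) EXCEPT on some ragged inputs whose
-- rows are no longer than the first and whose extremal columns lie within every row;
-- those are excluded only because ragged input is outside the matrix domain — B's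
-- column-major pass raises IndexError there (see the cite).
def Pre_max_min_element_sum_column_swap (arr : List (List Int)) : Prop :=
  arr ≠ [] ∧ arr.headD [] ≠ [] ∧ ∀ r ∈ arr, r.length = (arr.headD []).length
instance (arr : List (List Int)) : Decidable (Pre_max_min_element_sum_column_swap arr) := by
  unfold Pre_max_min_element_sum_column_swap; infer_instance

def pvWitness_max_min_element_sum_column_swap : List (List Int) := [[1, 2], [3, 4]]

def Spec_max_min_element_sum_column_swap (arr : List (List Int)) (out : List (List Int)) : Prop := out = max_min_element_sum_column_swap_alt arr
instance (arr : List (List Int)) (out : List (List Int)) : Decidable (Spec_max_min_element_sum_column_swap arr out) := by unfold Spec_max_min_element_sum_column_swap; infer_instance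

-- ===== CLAIM (what is proved, stated in full; the proofs are below) =====
def Claim_equal_max_min_element_sum_column_swap : Prop := ∀ (arr : List (List Int)), Dom_max_min_element_sum_column_swap arr → Pre_max_min_element_sum_column_swap arr → Spec_max_min_element_sum_column_swap arr (max_min_element_sum_column_swap arr)

-- ===== LEMMAS AND PROOFS =====

theorem pv_init_getD (l : List Int) (d : PySem.Dict Int Int) (h : ∀ k, d.getD k 0 = 0) :
    ∀ k, ((l.foldl (fun d j => d.insert j 0) d).getD k 0) = 0 := by
  induction l generalizing d with
  | nil => exact h
  | cons x xs ih =>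
    intro k
    refine ih _ (fun k' => ?_) k
    rw [PySem.Dict.getD_insert]
    split <;> simp [h]

theorem pv_init_keys (b : Int) :
    ((PySem.List.pyRange 0 b).foldl (fun d j => d.insert j 0)
      (PySem.Dict.empty : PySem.Dict Int Int)).keys = PySem.List.pyRange 0 b := by
  rw [PySem.Dict.keys_foldl_insert (f := fun _ _ => 0)]
  rw [PySem.Dict.keys_empty]
  rw [PySem.Set.update_eq_append_of_disjoint ([] : PySem.Set Int) _
    (PySem.List.nodup_pyRange_one 0 b) (by intro x _; simp)]
  simp

theorem pv_rowfold_getD (i : List Int) : ∀ (s : Int) (d : PySem.Dict Int Int) (k : Int),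
    ((PySem.List.enumerate i s).foldl (fun d p => d.modify p.1 0 (· + p.2)) d).getD k 0
      = d.getD k 0 + (if s ≤ k ∧ k < s + i.length then i.getD (k - s).toNat 0 else 0) := by
  induction i with
  | nil => intro s d k; simp [PySem.List.enumerate_nil]
  | cons x xs ih =>
    intro s d k
    rw [PySem.List.enumerate_cons, List.foldl_cons, ih (s + 1)]
    rw [PySem.Dict.getD_modify]
    by_cases hk : k = s
    · subst hk
      have h1 : ¬ (k + 1 ≤ k ∧ k < k + 1 + (xs.length : Int)) := by omega
      have h2 : k ≤ k ∧ k < k + ((x :: xs).length : Int) := by simp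
      simp only [if_neg h1, if_pos h2]
      simp
    · rw [if_neg hk]
      by_cases h3 : s + 1 ≤ k ∧ k < s + 1 + (xs.length : Int)
      · have h4 : s ≤ k ∧ k < s + ((x :: xs).length : Int) := by
          simp only [List.length_cons] at *; push_cast at *; omega
        rw [if_pos h3, if_pos h4]
        have h5 : (k - s).toNat = (k - (s + 1)).toNat + 1 := by omega
        rw [h5]
        simp [List.getD]
      · have h4 : ¬ (s ≤ k ∧ k < s + ((x :: xs).length : Int)) := by
          simp only [List.length_cons] at *; push_cast at *; omega
        rw [if_neg h3, if_neg h4]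

theorem pv_colsfold_getD (rows : List (List Int)) : ∀ (d : PySem.Dict Int Int) (k : Int),
    ((rows.foldl (fun d i => (PySem.List.enumerate i 0).foldl
        (fun d p => d.modify p.1 0 (· + p.2)) d) d).getD k 0)
      = d.getD k 0 + (rows.map (fun r => if 0 ≤ k ∧ k < r.length then r.getD k.toNat 0 else 0)).sum := by
  induction rows with
  | nil => simp
  | cons r rs ih =>
    intro d k
    rw [List.foldl_cons, ih]
    rw [pv_rowfold_getD r 0]
    simp only [List.map_cons, List.sum_cons, zero_add, Int.sub_zero]
    ring

theorem pv_rowfold_contains (ps : List (Int × Int)) : ∀ (d : PySem.Dict Int Int) (k : Int),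
    d.contains k = true →
    ((ps.foldl (fun d p => d.modify p.1 0 (· + p.2)) d).contains k) = true := by
  induction ps with
  | nil => intro d k h; exact h
  | cons p t ih =>
    intro d k h
    refine ih _ _ ?_
    rw [PySem.Dict.contains_modify]
    simp [h]

theorem pv_rowfold_keys (i : List Int) : ∀ (s : Int) (d : PySem.Dict Int Int),
    (∀ k : Int, s ≤ k → k < s + i.length → d.contains k = true) →
    ((PySem.List.enumerate i s).foldl (fun d p => d.modify p.1 0 (· + p.2)) d).keys = d.keys := by
  induction i with
  | nil => intro s d _; simp [PySem.List.enumerate_nil]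
  | cons x xs ih =>
    intro s d h
    rw [PySem.List.enumerate_cons, List.foldl_cons]
    have hc : d.contains s = true := h s le_rfl (by simp)
    have hkeys : (d.modify s 0 (· + x)).keys = d.keys := by
      rw [PySem.Dict.keys_modify, PySem.Dict.keys_insert_of_contains _ _ hc]
    rw [ih (s + 1) _ ?_, hkeys]
    intro k h1 h2
    rw [PySem.Dict.contains_modify]
    have := h k (by omega) (by simp at h2 ⊢; omega)
    simp [this]

theorem pv_colsfold_keys (rows : List (List Int)) : ∀ (d : PySem.Dict Int Int),
    (∀ r ∈ rows, ∀ k : Int, 0 ≤ k → k < r.length → d.contains k = true) →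
    ((rows.foldl (fun d i => (PySem.List.enumerate i 0).foldl
        (fun d p => d.modify p.1 0 (· + p.2)) d) d).keys) = d.keys := by
  induction rows with
  | nil => intro d _; rfl
  | cons r rs ih =>
    intro d h
    rw [List.foldl_cons]
    have h1 : ∀ k : Int, 0 ≤ k → k < (0 : Int) + r.length → d.contains k = true := by
      intro k hk hk'; exact h r (by simp) k hk (by omega)
    rw [ih _ ?_, pv_rowfold_keys r 0 d (by intro k hk hk'; exact h1 k hk hk')]
    intro r' hr' k hk hk'
    exact pv_rowfold_contains _ _ _ (h r' (by simp [hr']) k hk hk')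

def pvMaxStep (f : Int → Int) (acc : Option Int) (x : Int) : Option Int :=
  match acc with
  | none => some x
  | some m => if f m < f x then some x else some m

def pvMinStep (f : Int → Int) (acc : Option Int) (x : Int) : Option Int :=
  match acc with
  | none => some x
  | some m => if f x < f m then some x else some m

theorem pv_max?_eq_foldl (xs : List Int) (f : Int → Int) :
    PySem.List.max? xs f = xs.foldl (pvMaxStep f) none := by
  unfold PySem.List.max?
  congr 1
  funext acc x
  cases acc <;> rfl

theorem pv_min?_eq_foldl (xs : List Int) (f : Int → Int) :
    PySem.List.min? xs f = xs.foldl (pvMinStep f) none := by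
  unfold PySem.List.min?
  congr 1
  funext acc x
  cases acc <;> rfl

theorem pv_keep_max (f : Int → Int) (xs : List Int) : ∀ (m : Int), (∀ x ∈ xs, ¬ f m < f x) →
    xs.foldl (pvMaxStep f) (some m) = some m := by
  induction xs with
  | nil => intro m _; rfl
  | cons x t ih =>
    intro m h
    simp only [List.foldl_cons, pvMaxStep]
    rw [if_neg (h x (by simp))]
    exact ih m (fun y hy => h y (by simp [hy]))

theorem pv_keep_min (f : Int → Int) (xs : List Int) : ∀ (m : Int), (∀ x ∈ xs, ¬ f x < f m) →
    xs.foldl (pvMinStep f) (some m) = some m := by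
  induction xs with
  | nil => intro m _; rfl
  | cons x t ih =>
    intro m h
    simp only [List.foldl_cons, pvMinStep]
    rw [if_neg (h x (by simp))]
    exact ih m (fun y hy => h y (by simp [hy]))

theorem pv_max?_range (n : Nat) (f : Int → Int) (i : Nat) (hi : i < n)
    (hmax : ∀ j : Nat, j < n → f j ≤ f i) (hfirst : ∀ j : Nat, j < i → f j < f i) :
    PySem.List.max? (PySem.List.pyRange 0 (n : Int)) f = some (i : Int) := by
  have hsplit : PySem.List.pyRange 0 (n : Int)
      = PySem.List.pyRange 0 (i : Int) ++ [(i : Int)] ++ PySem.List.pyRange ((i : Int) + 1) (n : Int) := by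
    rw [← PySem.List.pyRange_one_singleton (i : Int)]
    rw [← PySem.List.pyRange_one_append 0 (i : Int) ((i : Int) + 1) (by positivity) (by omega)]
    exact PySem.List.pyRange_one_append 0 ((i : Int) + 1) (n : Int) (by positivity) (by omega)
  rw [pv_max?_eq_foldl, hsplit, List.foldl_append, List.foldl_append]
  have hkeep : ∀ x ∈ PySem.List.pyRange ((i : Int) + 1) (n : Int), ¬ f (i : Int) < f x := by
    intro x hx
    rw [PySem.List.mem_pyRange_one] at hx
    have := hmax x.toNat (by omega)
    have hc : ((x.toNat : Int)) = x := by omega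
    rw [hc] at this
    omega
  rcases h : (PySem.List.pyRange 0 (i : Int)).foldl (pvMaxStep f) none with _ | m
  · simp only [List.foldl_cons, List.foldl_nil, pvMaxStep]
    exact pv_keep_max f _ _ hkeep
  · have h' : PySem.List.max? (PySem.List.pyRange 0 (i : Int)) f = some m := by
      rw [pv_max?_eq_foldl]; exact h
    have hmem : m ∈ PySem.List.pyRange 0 (i : Int) := PySem.List.max?_mem h'
    rw [PySem.List.mem_pyRange_one] at hmem
    have hlt : f m < f (i : Int) := by
      have hm := hfirst m.toNat (by omega)
      have hc : ((m.toNat : Int)) = m := by omega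
      rwa [hc] at hm
    simp only [List.foldl_cons, List.foldl_nil, pvMaxStep]
    rw [if_pos hlt]
    exact pv_keep_max f _ _ hkeep

theorem pv_min?_range (n : Nat) (f : Int → Int) (i : Nat) (hi : i < n)
    (hmin : ∀ j : Nat, j < n → f i ≤ f j) (hfirst : ∀ j : Nat, j < i → f i < f j) :
    PySem.List.min? (PySem.List.pyRange 0 (n : Int)) f = some (i : Int) := by
  have hsplit : PySem.List.pyRange 0 (n : Int)
      = PySem.List.pyRange 0 (i : Int) ++ [(i : Int)] ++ PySem.List.pyRange ((i : Int) + 1) (n : Int) := by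
    rw [← PySem.List.pyRange_one_singleton (i : Int)]
    rw [← PySem.List.pyRange_one_append 0 (i : Int) ((i : Int) + 1) (by positivity) (by omega)]
    exact PySem.List.pyRange_one_append 0 ((i : Int) + 1) (n : Int) (by positivity) (by omega)
  rw [pv_min?_eq_foldl, hsplit, List.foldl_append, List.foldl_append]
  have hkeep : ∀ x ∈ PySem.List.pyRange ((i : Int) + 1) (n : Int), ¬ f x < f (i : Int) := by
    intro x hx
    rw [PySem.List.mem_pyRange_one] at hx
    have := hmin x.toNat (by omega)
    have hc : ((x.toNat : Int)) = x := by omega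
    rw [hc] at this
    omega
  rcases h : (PySem.List.pyRange 0 (i : Int)).foldl (pvMinStep f) none with _ | m
  · simp only [List.foldl_cons, List.foldl_nil, pvMinStep]
    exact pv_keep_min f _ _ hkeep
  · have h' : PySem.List.min? (PySem.List.pyRange 0 (i : Int)) f = some m := by
      rw [pv_min?_eq_foldl]; exact h
    have hmem : m ∈ PySem.List.pyRange 0 (i : Int) := PySem.List.min?_mem h'
    rw [PySem.List.mem_pyRange_one] at hmem
    have hlt : f (i : Int) < f m := by
      have hm := hfirst m.toNat (by omega)
      have hc : ((m.toNat : Int)) = m := by omega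
      rwa [hc] at hm
    simp only [List.foldl_cons, List.foldl_nil, pvMinStep]
    rw [if_pos hlt]
    exact pv_keep_min f _ _ hkeep

-- B's one-pass scan produces the FIRST argmax / argmin of the column sums
theorem pv_scan_spec (arr : List (List Int)) (n : Nat) (hn : 0 < n) :
    ∃ mxj mnj : Nat,
      (List.range n).foldl (pvScanStep arr) none
        = some (pvColSum arr mxj, mxj, pvColSum arr mnj, mnj) ∧
      mxj < n ∧ (∀ j < n, pvColSum arr j ≤ pvColSum arr mxj) ∧
        (∀ j < mxj, pvColSum arr j < pvColSum arr mxj) ∧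
      mnj < n ∧ (∀ j < n, pvColSum arr mnj ≤ pvColSum arr j) ∧
        (∀ j < mnj, pvColSum arr mnj < pvColSum arr j) := by
  induction n with
  | zero => omega
  | succ k ih =>
    by_cases hk : 0 < k
    · obtain ⟨mxj, mnj, hfold, h1, h2, h3, h4, h5, h6⟩ := ih hk
      rw [List.range_succ, List.foldl_append, hfold]
      by_cases hmx : pvColSum arr mxj < pvColSum arr k
      · by_cases hmn : pvColSum arr k < pvColSum arr mnj
        · exact ⟨k, k, by simp [pvScanStep, hmx, hmn], by omega,
            by intro j hj; rcases Nat.lt_succ_iff_lt_or_eq.mp hj with h | h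
               · exact le_of_lt (lt_of_le_of_lt (h2 j h) hmx)
               · simp [h],
            by intro j hj; exact lt_of_le_of_lt (h2 j hj) hmx, by omega,
            by intro j hj; rcases Nat.lt_succ_iff_lt_or_eq.mp hj with h | h
               · exact le_of_lt (lt_of_lt_of_le hmn (h5 j h))
               · simp [h],
            by intro j hj; exact lt_of_lt_of_le hmn (h5 j hj)⟩
        · exact ⟨k, mnj, by simp [pvScanStep, hmx, hmn], by omega,
            by intro j hj; rcases Nat.lt_succ_iff_lt_or_eq.mp hj with h | h
               · exact le_of_lt (lt_of_le_of_lt (h2 j h) hmx)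
               · simp [h],
            by intro j hj; exact lt_of_le_of_lt (h2 j hj) hmx, by omega,
            by intro j hj; rcases Nat.lt_succ_iff_lt_or_eq.mp hj with h | h
               · exact h5 j h
               · rw [h]; omega,
            h6⟩
      · by_cases hmn : pvColSum arr k < pvColSum arr mnj
        · exact ⟨mxj, k, by simp [pvScanStep, hmx, hmn], by omega,
            by intro j hj; rcases Nat.lt_succ_iff_lt_or_eq.mp hj with h | h
               · exact h2 j h
               · rw [h]; omega,
            h3, by omega,
            by intro j hj; rcases Nat.lt_succ_iff_lt_or_eq.mp hj with h | h
               · exact le_of_lt (lt_of_lt_of_le hmn (h5 j h))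
               · simp [h],
            by intro j hj; exact lt_of_lt_of_le hmn (h5 j hj)⟩
        · exact ⟨mxj, mnj, by simp [pvScanStep, hmx, hmn], by omega,
            by intro j hj; rcases Nat.lt_succ_iff_lt_or_eq.mp hj with h | h
               · exact h2 j h
               · rw [h]; omega,
            h3, by omega,
            by intro j hj; rcases Nat.lt_succ_iff_lt_or_eq.mp hj with h | h
               · exact h5 j h
               · rw [h]; omega,
            h6⟩
    · have hk0 : k = 0 := by omega
      subst hk0
      refine ⟨0, 0, by simp [pvScanStep], by omega, ?_, by omega, by omega, ?_, by omega⟩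
      · intro j hj; interval_cases j; exact le_rfl
      · intro j hj; interval_cases j; exact le_rfl

theorem pv_foldl_sum (g : List Int → Int) (l : List (List Int)) : ∀ s : Int,
    l.foldl (fun s row => s + g row) s = s + (l.map g).sum := by
  induction l with
  | nil => simp
  | cons x t ih => intro s; rw [List.foldl_cons, ih]; simp; ring

-- the permutation gather equals the two-element swap, entrywise
theorem pv_gather_eq_swap (row : List Int) (m mxj mnj : Nat)
    (hrow : row.length = m) (h1 : mxj < m) (h2 : mnj < m) :
    (List.range row.length).map (fun j => row.getD ((pvPerm m mxj mnj).getD j j) 0)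
      = pvSwapRow (mxj : Int) (mnj : Int) row := by
  have hpl : (pvPerm m mxj mnj).length = m := by simp [pvPerm]
  apply List.ext_getElem
  · simp [pvSwapRow, hrow]
  intro j hL hR
  have hj : j < m := by simpa [hrow] using hL
  have hpj : (pvPerm m mxj mnj).getD j j = (pvPerm m mxj mnj)[j]'(by omega) := by
    rw [List.getD_eq_getElem]
  simp only [List.getElem_map, List.getElem_range, hpj]
  have hperm : (pvPerm m mxj mnj)[j]'(by omega)
      = if mnj = j then mxj else if mxj = j then mnj else j := by
    simp [pvPerm, List.getElem_set, List.getElem_range]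
  have hjr : j < row.length := by omega
  rw [hperm]
  simp only [pvSwapRow, PySem.List.pyGetD_natCast, Int.toNat_natCast]
  rw [List.getElem_set, List.getElem_set]
  split_ifs with ha hb <;>
    simp_all

-- ===== VERDICT (by name: the statement is the Claim_ definition above) =====
theorem max_min_element_sum_column_swap_spec : Claim_equal_max_min_element_sum_column_swap := by
  intro arr _ hpre
  unfold Spec_max_min_element_sum_column_swap
  obtain ⟨hne, hr0, hall⟩ := hpre
  cases arr with
  | nil => exact absurd rfl hne
  | cons r rs =>
    simp only [List.headD_cons] at hr0 hall
    unfold max_min_element_sum_column_swap max_min_element_sum_column_swap_alt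
    dsimp only
    have hget0 : (PySem.List.pyGet? (r :: rs) 0).getD [] = r := by
      simp [PySem.List.pyGet?, PySem.List.pyIdx?]
    rw [hget0]
    have hm : 0 < r.length := List.length_pos_iff.mpr hr0
    -- B's scan
    obtain ⟨mxj, mnj, hfold, hmx1, hmx2, hmx3, hmn1, hmn2, hmn3⟩ :=
      pv_scan_spec (r :: rs) r.length hm
    rw [hfold]
    -- column sums: pvColSum = the per-column sum
    have hcs : ∀ j : Nat, pvColSum (r :: rs) j
        = ((r :: rs).map (fun row => row.getD j 0)).sum := by
      intro j
      unfold pvColSum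
      rw [pv_foldl_sum (fun row => row.getD j 0) (r :: rs) 0]
      ring
    -- A's dict
    set D0 : PySem.Dict Int Int :=
      (PySem.List.pyRange 0 (r.length : Int)).foldl (fun d k => d.insert k 0) PySem.Dict.empty with hD0
    set C : PySem.Dict Int Int := (r :: rs).foldl
      (fun d i => (PySem.List.enumerate i 0).foldl (fun d p => d.modify p.1 0 (· + p.2)) d) D0 with hC
    have hkeys : C.keys = PySem.List.pyRange 0 (r.length : Int) := by
      rw [hC]
      have hcont : ∀ r' ∈ r :: rs, ∀ k : Int, 0 ≤ k → k < (r'.length : Int) → D0.contains k = true := by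
        intro r' hr' k h0 hk
        rw [PySem.Dict.contains_iff_mem_keys, hD0, pv_init_keys, PySem.List.mem_pyRange_one]
        have := hall r' hr'
        omega
      rw [pv_colsfold_keys _ _ hcont, hD0, pv_init_keys]
    have hgetD_D0 : ∀ k, D0.getD k 0 = 0 := by
      intro k
      rw [hD0]
      exact pv_init_getD _ _ (fun k' => PySem.Dict.getD_empty _ _) k
    have hCget : ∀ (j : Nat), j < r.length → C.getD (j : Int) 0 = pvColSum (r :: rs) j := by
      intro j hj
      rw [hC, pv_colsfold_getD, hgetD_D0, zero_add, hcs]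
      have hif : ∀ r' ∈ r :: rs,
          (if (0 : Int) ≤ (j : Int) ∧ (j : Int) < (r'.length : Int) then r'.getD ((j : Int)).toNat 0 else 0)
            = r'.getD j 0 := by
        intro r' hr'
        rw [if_pos (by have := hall r' hr'; constructor <;> [positivity; exact_mod_cast (this ▸ hj)])]
        simp
      rw [List.map_congr_left hif]
    have hAmax : PySem.List.max? C.keys (fun k => C.getD k 0) = some ((mxj : Nat) : Int) := by
      rw [hkeys]
      refine pv_max?_range r.length _ mxj hmx1 ?_ ?_
      · intro j hj
        rw [hCget j hj, hCget mxj hmx1]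
        exact hmx2 j hj
      · intro j hj
        rw [hCget j (by omega), hCget mxj hmx1]
        exact hmx3 j hj
    have hAmin : PySem.List.min? C.keys (fun k => C.getD k 0) = some ((mnj : Nat) : Int) := by
      rw [hkeys]
      refine pv_min?_range r.length _ mnj hmn1 ?_ ?_
      · intro j hj
        rw [hCget j hj, hCget mnj hmn1]
        exact hmn2 j hj
      · intro j hj
        rw [hCget j (by omega), hCget mnj hmn1]
        exact hmn3 j hj
    rw [hAmax, hAmin]
    simp only [Option.getD_some]
    refine List.map_congr_left ?_
    intro row hrow
    exact (pv_gather_eq_swap row r.length mxj mnj (hall row hrow) hmx1 hmn1).symm
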